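-- pv_equiv track=rewrite | github.com/PiKa919/Pythonmania | class/exp2.py | next_vowel
-- ===== SOURCE A (Python) =====
-- def next_vowel(word): #function definition
--     vowels = 'aeiou'    #vowels
--     new_word = ''
--     for letter in word: #loop to check each letter
--         if letter in vowels:    #if letter is vowel
--             index = vowels.index(letter)    #index of vowel
--             next_index = (index + 1) % len(vowels)  #next index of vowel
--             new_letter = vowels[next_index] #next vowel
--             new_word += new_letter  #new word
--         else:
--             new_word += letter  #if letter is not vowel
--     return new_word #return new word
-- ===== SOURCE B (Python) =====
-- def next_vowel(word):
--     # Staged whole-string passes: park 'u' on a sentinel so the cyclic shift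
--     # cannot cascade, shift the remaining vowels up, then land the sentinel on 'a'.
--     word = word.replace('u', '\x00')
--     word = word.replace('o', 'u')
--     word = word.replace('i', 'o')
--     word = word.replace('e', 'i')
--     word = word.replace('a', 'e')
--     return word.replace('\x00', 'a')
-- ===== Notes on version B (the rewrite author's own statement) =====
-- stated objective: faster
-- what changed: Replaced A's single per-character loop with index lookup and string concatenation by six staged whole-string str.replace passes: the last vowel of the cycle is parked on a NUL sentinel so the shift cannot cascade, the other four vowels are each shifted up in one pass, and the sentinel finally becomes the first vowel of the cycle.
import Mathlib
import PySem

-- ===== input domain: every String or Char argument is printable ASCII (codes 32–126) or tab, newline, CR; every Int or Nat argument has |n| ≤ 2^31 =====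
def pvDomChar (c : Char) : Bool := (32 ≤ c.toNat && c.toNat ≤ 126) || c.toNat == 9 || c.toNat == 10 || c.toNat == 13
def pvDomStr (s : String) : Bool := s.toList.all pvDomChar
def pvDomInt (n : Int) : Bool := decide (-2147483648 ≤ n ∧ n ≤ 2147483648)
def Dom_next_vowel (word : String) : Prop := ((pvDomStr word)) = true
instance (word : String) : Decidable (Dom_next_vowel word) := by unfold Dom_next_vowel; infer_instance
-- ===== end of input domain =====

-- B replaces A's per-character loop by six staged whole-string replace passes (the last
-- vowel of the cycle parked on a NUL sentinel, the other four shifted up, the sentinel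
-- landed on the first vowel); equal on the printable-ASCII domain (no NUL there), and
-- measurably faster (C-level str.replace passes instead of a Python per-character loop).

-- ===== PORT A =====
def next_vowel (word : String) : String :=
  let vowels : List Char := "aeiou".toList
  String.ofList (word.toList.foldl (fun new_word letter =>
    if letter ∈ vowels then
      let index := (PySem.List.index? vowels letter).getD 0
      let next_index := (index + 1) % vowels.length
      let new_letter := vowels.getD next_index letter
      new_word ++ [new_letter]
    else
      new_word ++ [letter]) [])

-- ===== PORT B =====
def next_vowel_alt (word : String) : String :=
  let w1 := PySem.Str.replace word "u" "\x00"
  let w2 := PySem.Str.replace w1 "o" "u"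
  let w3 := PySem.Str.replace w2 "i" "o"
  let w4 := PySem.Str.replace w3 "e" "i"
  let w5 := PySem.Str.replace w4 "a" "e"
  PySem.Str.replace w5 "\x00" "a"

-- ===== PRECONDITION & SPEC =====
def Spec_next_vowel (word : String) (out : String) : Prop := out = next_vowel_alt word
instance (word : String) (out : String) : Decidable (Spec_next_vowel word out) := by unfold Spec_next_vowel; infer_instance

-- ===== CLAIM (what is proved, stated in full; the proofs are below) =====
def Claim_equal_next_vowel : Prop := ∀ (word : String), Dom_next_vowel word → Spec_next_vowel word (next_vowel word)

-- ===== LEMMAS AND PROOFS =====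

-- A's per-character step, extracted.
def pvStep (c : Char) : Char :=
  if c ∈ ("aeiou".toList) then
    ("aeiou".toList).getD (((PySem.List.index? ("aeiou".toList) c).getD 0 + 1) % ("aeiou".toList).length) c
  else c

-- single-character replace is a per-character map
theorem replace_go_single (v w : Char) (l acc : List Char) (fuel : Nat)
    (h : l.length ≤ fuel) :
    PySem.Chars.replace.go [v] [w] fuel l acc
      = acc.reverse ++ l.map (fun x => if x = v then w else x) := by
  induction l generalizing fuel acc with
  | nil => cases fuel <;> simp [PySem.Chars.replace.go]
  | cons c t ih =>
    cases fuel with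
    | zero => simp at h
    | succ n =>
      simp only [List.length_cons, Nat.succ_le_succ_iff] at h
      by_cases hc : c = v
      · subst hc
        have hpre : List.isPrefixOf [c] (c :: t) = true := by
          simp [List.isPrefixOf]
        rw [PySem.Chars.replace.go, if_pos hpre]
        simp only [List.length_cons, List.length_nil, Nat.zero_add, List.drop_one,
          List.tail_cons]
        rw [ih _ _ h]
        simp
      · have hpre : List.isPrefixOf [v] (c :: t) = false := by
          simp [List.isPrefixOf, Ne.symm hc]
        rw [PySem.Chars.replace.go, if_neg (by simp [hpre])]
        rw [ih _ _ h]
        simp [hc]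

theorem replace_single (v w : Char) (s : List Char) :
    PySem.Chars.replace s [v] [w] = s.map (fun x => if x = v then w else x) := by
  rw [PySem.Chars.replace]
  simp only [List.isEmpty_cons, Bool.false_eq_true, if_false]
  exact replace_go_single v w s [] s.length (le_refl _)

-- A's fold is the per-character map of pvStep
theorem fold_eq_map (l acc : List Char) :
    l.foldl (fun new_word letter => new_word ++ [pvStep letter]) acc
      = acc ++ l.map pvStep := by
  induction l generalizing acc with
  | nil => simp
  | cons c t ih => rw [List.foldl_cons, ih]; simp

-- ===== VERDICT (by name: the statement is the Claim_ definition above) =====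
theorem next_vowel_spec : Claim_equal_next_vowel := by
  intro word hdom
  have hfun : (fun (new_word : List Char) (letter : Char) =>
      if letter ∈ ("aeiou".toList) then
        new_word ++ [("aeiou".toList).getD (((PySem.List.index? ("aeiou".toList) letter).getD 0 + 1) % ("aeiou".toList).length) letter]
      else new_word ++ [letter])
      = (fun new_word letter => new_word ++ [pvStep letter]) := by
    funext a c
    unfold pvStep
    split <;> rfl
  have hall : ∀ c ∈ word.toList, pvDomChar c = true := by
    intro c hcm
    exact List.all_eq_true.mp hdom c hcm
  simp only [Spec_next_vowel, next_vowel, next_vowel_alt]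
  apply String.toList_inj.mp
  rw [hfun, fold_eq_map]
  simp only [List.nil_append, PySem.Str.toList_replace, String.toList_ofList]
  rw [show ("u" : String).toList = ['u'] by decide,
      show ("o" : String).toList = ['o'] by decide,
      show ("i" : String).toList = ['i'] by decide,
      show ("e" : String).toList = ['e'] by decide,
      show ("a" : String).toList = ['a'] by decide,
      show ("\x00" : String).toList = ['\x00'] by decide]
  rw [replace_single, replace_single, replace_single, replace_single, replace_single, replace_single]
  simp only [List.map_map]
  refine List.map_congr_left (fun c hcm => ?_)
  have hc := hall c hcm
  by_cases hv : c ∈ ['a','e','i','o','u']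
  · fin_cases hv <;> decide
  · simp only [List.mem_cons, List.not_mem_nil, or_false, not_or] at hv
    obtain ⟨h1, h2, h3, h4, h5⟩ := hv
    have hnul : c ≠ '\x00' := by
      intro h; subst h; simp [pvDomChar] at hc
    simp [pvStep, h1, h2, h3, h4, h5, hnul]
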